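-- pv_equiv track=rewrite | github.com/kiran-sec/PackageSentinel | src/signal_collector.py | _check_phonetic_similarity
-- ===== SOURCE A (Python) =====
-- def _check_phonetic_similarity(name1: str, name2: str) -> bool:
--     """Check phonetic similarity using simplified Soundex algorithm."""
--     def soundex(name: str) -> str:
--         if not name:
--             return "0000"
--
--         name = name.upper()
--         soundex_code = name[0]  # Keep first letter
--
--         # Soundex mapping
--         mapping = {
--             'BFPV': '1', 'CGJKQSXZ': '2', 'DT': '3',
--             'L': '4', 'MN': '5', 'R': '6'
--         }
--
--         for char in name[1:]:
--             for group, code in mapping.items():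
--                 if char in group:
--                     if soundex_code[-1] != code:  # Avoid adjacent duplicates
--                         soundex_code += code
--                     break
--
--         # Pad with zeros and limit to 4 characters
--         soundex_code = (soundex_code + "0000")[:4]
--         return soundex_code
--
--     return soundex(name1) == soundex(name2) and len(name1) >= 4 and len(name2) >= 4
-- ===== SOURCE B (Python) =====
-- # B: no Soundex codes are built at all.  Reject early on the length and
-- # first-letter tests, then lazily co-advance two collapsed-digit streams
-- # (parallel find-table lookup), comparing at most three digit slots with an
-- # early exit on the first mismatch.
-- _LETTERS = "BFPVCGJKQSXZDTLMNR"
-- _DIGITS = "111122222222334556"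
--
--
-- def _advance(u, i, prev):
--     """Next collapsed digit of u at/after index i ('0' = exhausted/padding)."""
--     while i < len(u):
--         k = _LETTERS.find(u[i])
--         i += 1
--         if k >= 0:
--             d = _DIGITS[k]
--             if d != prev:
--                 return d, i, d
--     return '0', i, prev
--
--
-- def _check_phonetic_similarity(name1: str, name2: str) -> bool:
--     if len(name1) < 4 or len(name2) < 4:
--         return False
--     u1, u2 = name1.upper(), name2.upper()
--     if u1[0] != u2[0]:
--         return False
--     i, p1 = 1, u1[0]
--     j, p2 = 1, u2[0]
--     for _ in range(3):
--         d1, i, p1 = _advance(u1, i, p1)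
--         d2, j, p2 = _advance(u2, j, p2)
--         if d1 != d2:
--             return False
--     return True
-- ===== Notes on version B (the rewrite author's own statement) =====
-- stated objective: alternative
-- what changed: B never materializes Soundex code strings: it rejects immediately on the two length tests and the first-letter comparison, then lazily co-advances two collapsed-digit streams over the names (parallel find-table lookup) and compares at most three digit slots, exiting on the first mismatch, instead of A's fully building, padding and truncating both codes before one string comparison.
import Mathlib
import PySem

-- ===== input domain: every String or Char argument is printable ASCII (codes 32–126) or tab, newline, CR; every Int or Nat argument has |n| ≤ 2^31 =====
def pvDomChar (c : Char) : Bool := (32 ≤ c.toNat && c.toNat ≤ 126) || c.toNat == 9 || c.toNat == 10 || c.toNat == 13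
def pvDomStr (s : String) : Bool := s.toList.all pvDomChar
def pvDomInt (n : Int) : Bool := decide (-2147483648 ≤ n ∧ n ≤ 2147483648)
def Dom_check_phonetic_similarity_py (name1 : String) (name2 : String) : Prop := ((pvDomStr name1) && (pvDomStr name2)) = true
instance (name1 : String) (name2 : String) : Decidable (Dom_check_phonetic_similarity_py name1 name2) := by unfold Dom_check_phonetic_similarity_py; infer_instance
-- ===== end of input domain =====

-- B never builds Soundex code strings: it rejects early on the length and
-- first-letter tests, then lazily co-advances two collapsed-digit streams,
-- comparing at most three digit slots with an early exit; objective: alternative.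


-- ===== PORT A =====
-- the dict literal `mapping` (insertion order of the six (group, code) pairs)
def pvMappingA : List (List Char × Char) :=
  [("BFPV".toList, '1'), ("CGJKQSXZ".toList, '2'), ("DT".toList, '3'),
   ("L".toList, '4'), ("MN".toList, '5'), ("R".toList, '6')]

-- the inner `for group, code in mapping.items(): if char in group: … ; break`
-- (soundex_code[-1] is read on a string that is always nonempty, so getLastD's
-- default '?' is never used)
def pvScanA (sc : List Char) (ch : Char) : List (List Char × Char) → List Char
  | [] => sc
  | (g, code) :: rest =>
      if ch ∈ g then (if sc.getLastD '?' ≠ code then sc ++ [code] else sc)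
      else pvScanA sc ch rest

-- the nested helper `soundex` of A (strings handled as List Char;
-- name[1:] = drop 1 and (…)[:4] = take 4, exact for these nonnegative slices)
def pvSoundexA (name : String) : List Char :=
  let l := name.toList
  if l = [] then "0000".toList
  else
    let u := PySem.Chars.upper l
    let sc0 := [u.headD '?']          -- name[0] (u nonempty here)
    let sc := (u.drop 1).foldl (fun acc ch => pvScanA acc ch pvMappingA) sc0
    (sc ++ "0000".toList).take 4

def check_phonetic_similarity_py (name1 : String) (name2 : String) : Bool :=
  (pvSoundexA name1 == pvSoundexA name2)
    && decide (4 ≤ name1.toList.length) && decide (4 ≤ name2.toList.length)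

-- ===== PORT B =====
-- the parallel lookup tables _LETTERS and _DIGITS
def pvLetters : List Char := "BFPVCGJKQSXZDTLMNR".toList
def pvDigitsT : List Char := "111122222222334556".toList

-- `_advance(u, i, prev)`: the `while i < len(u)` index loop, carried as the
-- remaining suffix u[i:] (returned suffix = returned index); returns
-- (digit-or-'0', rest, prev)
def pvAdvance : List Char → Char → Char × List Char × Char
  | [], prev => ('0', [], prev)
  | c :: rest, prev =>
      let k := PySem.Chars.find pvLetters [c]     -- _LETTERS.find(u[i])
      if 0 ≤ k then
        let d := pvDigitsT.getD k.toNat '?'       -- _DIGITS[k], k in range here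
        if d ≠ prev then (d, rest, d) else pvAdvance rest prev
      else pvAdvance rest prev

-- the `for _ in range(3)` loop with its early `return False`
def pvCmpLoop : Nat → List Char → Char → List Char → Char → Bool
  | 0, _, _, _, _ => true
  | Nat.succ n, r1, p1, r2, p2 =>
      let a1 := pvAdvance r1 p1
      let a2 := pvAdvance r2 p2
      if a1.1 ≠ a2.1 then false else pvCmpLoop n a1.2.1 a1.2.2 a2.2.1 a2.2.2

def check_phonetic_similarity_py_alt (name1 : String) (name2 : String) : Bool :=
  let l1 := name1.toList
  let l2 := name2.toList
  if l1.length < 4 ∨ l2.length < 4 then false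
  else
    let u1 := PySem.Chars.upper l1
    let u2 := PySem.Chars.upper l2
    if u1.headD '?' ≠ u2.headD '?' then false    -- u1[0] != u2[0] (both nonempty here)
    else pvCmpLoop 3 (u1.drop 1) (u1.headD '?') (u2.drop 1) (u2.headD '?')

-- ===== PRECONDITION & SPEC =====
def Spec_check_phonetic_similarity_py (name1 : String) (name2 : String) (out : Bool) : Prop := out = check_phonetic_similarity_py_alt name1 name2
instance (name1 : String) (name2 : String) (out : Bool) : Decidable (Spec_check_phonetic_similarity_py name1 name2 out) := by unfold Spec_check_phonetic_similarity_py; infer_instance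

-- ===== CLAIM (what is proved, stated in full; the proofs are below) =====
def Claim_equal_check_phonetic_similarity_py : Prop := ∀ (name1 : String) (name2 : String), Dom_check_phonetic_similarity_py name1 name2 → Spec_check_phonetic_similarity_py name1 name2 (check_phonetic_similarity_py name1 name2)

-- ===== LEMMAS AND PROOFS =====

-- pure lookup that pvScanA performs before touching sc
def pvLookA (ch : Char) : List (List Char × Char) → Option Char
  | [] => none
  | (g, c) :: rest => if ch ∈ g then some c else pvLookA ch rest

-- the digits A's tail loop appends, in order
def pvDmap (l : List Char) : List Char := l.filterMap (fun c => pvLookA c pvMappingA)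

lemma pvScanA_eq_look (sc : List Char) (ch : Char) (m : List (List Char × Char)) :
    pvScanA sc ch m =
      match pvLookA ch m with
      | none => sc
      | some d => if sc.getLastD '?' ≠ d then sc ++ [d] else sc := by
  induction m with
  | nil => rfl
  | cons gc rest ih =>
      obtain ⟨g, c⟩ := gc
      by_cases h : ch ∈ g <;> simp [pvScanA, pvLookA, h, ih]

-- B's find-table lookup agrees with A's group scan
lemma pvLetters_eq : pvLetters = ['B','F','P','V','C','G','J','K','Q','S','X','Z','D','T','L','M','N','R'] := by decide

lemma blook_eq (c : Char) :
    (if 0 ≤ PySem.Chars.find pvLetters [c]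
     then some (pvDigitsT.getD (PySem.Chars.find pvLetters [c]).toNat '?') else none)
      = pvLookA c pvMappingA := by
  by_cases hc : c ∈ pvLetters
  · rw [pvLetters_eq] at hc; fin_cases hc <;> decide
  · have hf : PySem.Chars.find pvLetters [c] = -1 :=
      (PySem.Chars.find_eq_neg_one_iff _ _).mpr (fun hinf => hc (hinf.sublist.subset (by simp)))
    rw [hf, if_neg (by decide)]
    rw [pvLetters_eq] at hc
    simp only [List.mem_cons, List.not_mem_nil, or_false, not_or] at hc
    obtain ⟨hB, hF, hP, hV, hC, hG, hJ, hK, hQ, hS, hX, hZ, hD, hT, hL, hM, hN, hR⟩ := hc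
    simp only [pvLookA, pvMappingA]
    have t : ∀ (g : List Char) (d : Char) (o : Option Char), c ∉ g →
        (if c ∈ g then some d else o) = o := by
      intro g d o hg; rw [if_neg hg]
    rw [t _ _ _ (by simp [hB, hF, hP, hV]), t _ _ _ (by simp [hC, hG, hJ, hK, hQ, hS, hX, hZ]),
        t _ _ _ (by simp [hD, hT]), t _ _ _ (by simp [hL]), t _ _ _ (by simp [hM, hN]),
        t _ _ _ (by simp [hR])]

-- the tail a dedup-append loop adds after a last-emitted char
def pvRun : Char → List Char → List Char
  | _, [] => []
  | l, d :: ds => if d = l then pvRun l ds else d :: pvRun d ds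

lemma foldA_eq_run (cs : List Char) :
    ∀ sc : List Char, sc ≠ [] →
      cs.foldl (fun acc ch => pvScanA acc ch pvMappingA) sc =
        sc ++ pvRun (sc.getLastD '?') (pvDmap cs) := by
  induction cs with
  | nil => intro sc _; simp [pvRun, pvDmap]
  | cons c cs ih =>
      intro sc hsc
      rw [List.foldl_cons, pvScanA_eq_look]
      show _ = sc ++ pvRun _ (pvDmap (c :: cs))
      unfold pvDmap
      rw [List.filterMap_cons]
      cases hdc : pvLookA c pvMappingA with
      | none => simpa [pvDmap] using ih sc hsc
      | some d =>
          dsimp only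
          by_cases hlast : sc.getLastD '?' ≠ d
          · have hne : sc ++ [d] ≠ [] := by simp
            have hl : (sc ++ [d]).getLastD '?' = d := by simp
            rw [if_pos hlast, ih (sc ++ [d]) hne, hl, pvRun, if_neg (by
              intro hdl; exact hlast hdl.symm)]
            simp [pvDmap]
          · rw [not_not] at hlast
            rw [if_neg (not_not_intro hlast), ih sc hsc, pvRun, if_pos hlast.symm]
            simp [pvDmap]

-- one step of B's _advance = head/tail of the collapsed-digit stream
lemma adv_spec (rest : List Char) (prev : Char) :
    (pvAdvance rest prev).1 = (pvRun prev (pvDmap rest)).headD '0'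
      ∧ pvRun (pvAdvance rest prev).2.2 (pvDmap (pvAdvance rest prev).2.1)
          = (pvRun prev (pvDmap rest)).tail := by
  induction rest generalizing prev with
  | nil => simp [pvAdvance, pvDmap, pvRun]
  | cons c rest ih =>
      have hb := blook_eq c
      cases hlook : pvLookA c pvMappingA with
      | none =>
          rw [hlook] at hb
          by_cases hk : (0:Int) ≤ PySem.Chars.find pvLetters [c]
          · rw [if_pos hk] at hb; exact absurd hb (by simp)
          · have hm : pvDmap (c :: rest) = pvDmap rest := by
              simp [pvDmap, hlook]
            rw [pvAdvance, if_neg hk, hm]; exact ih prev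
      | some d =>
          rw [hlook] at hb
          by_cases hk : (0:Int) ≤ PySem.Chars.find pvLetters [c]
          · rw [if_pos hk] at hb
            have hd : pvDigitsT.getD (PySem.Chars.find pvLetters [c]).toNat '?' = d :=
              Option.some.inj hb
            have hm : pvDmap (c :: rest) = d :: pvDmap rest := by
              simp [pvDmap, hlook]
            rw [pvAdvance, if_pos hk, hm]
            dsimp only
            rw [hd]
            by_cases hdp : d = prev
            · rw [if_neg (not_not_intro hdp), pvRun, if_pos hdp]
              exact ih prev
            · rw [if_pos hdp, pvRun, if_neg hdp]
              exact ⟨rfl, rfl⟩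
          · rw [if_neg hk] at hb; exact absurd hb (by simp)

-- (l ++ replicate m '0').take n depends only on the first n pad chars
lemma take_app_rep (n : Nat) : ∀ (m : Nat) (l : List Char), n ≤ m →
    (l ++ List.replicate m '0').take n = (l ++ List.replicate n '0').take n := by
  induction n with
  | zero => intro m l _; simp
  | succ n ih =>
      intro m l hm
      cases l with
      | nil =>
          simp only [List.nil_append, List.take_replicate]
          congr 1
          omega
      | cons x xs =>
          simp only [List.cons_append, List.take_succ_cons]
          rw [ih m xs (le_trans (Nat.le_succ n) hm),
              ih (n+1) xs (Nat.le_succ n)]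

-- padded 4-char truncation, one slot at a time
def pvPadTake (n : Nat) (l : List Char) : List Char := (l ++ List.replicate n '0').take n

lemma padTake_succ (n : Nat) (l : List Char) :
    pvPadTake (n+1) l = l.headD '0' :: pvPadTake n l.tail := by
  cases l with
  | nil => simp [pvPadTake, List.take_replicate, List.replicate_succ]
  | cons x xs =>
      simp only [pvPadTake, List.cons_append, List.take_succ_cons, List.headD_cons,
        List.tail_cons]
      rw [take_app_rep n (n+1) xs (Nat.le_succ n)]

-- B's 3-slot comparison loop = equality of the padded truncated digit streams
lemma cmp_spec (n : Nat) : ∀ (r1 : List Char) (p1 : Char) (r2 : List Char) (p2 : Char),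
    pvCmpLoop n r1 p1 r2 p2 =
      decide (pvPadTake n (pvRun p1 (pvDmap r1)) = pvPadTake n (pvRun p2 (pvDmap r2))) := by
  induction n with
  | zero => intro r1 p1 r2 p2; simp [pvCmpLoop, pvPadTake]
  | succ n ih =>
      intro r1 p1 r2 p2
      obtain ⟨e1, f1⟩ := adv_spec r1 p1
      obtain ⟨e2, f2⟩ := adv_spec r2 p2
      rw [pvCmpLoop]
      rw [ih, f1, f2, e1, e2, padTake_succ, padTake_succ]
      by_cases h : (pvRun p1 (pvDmap r1)).headD '0' = (pvRun p2 (pvDmap r2)).headD '0' <;>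
        simp

-- A's soundex code = first letter + 3 padded collapsed digits
lemma soundexA_char (name : String) (h : ¬ name.toList = []) :
    pvSoundexA name =
      (PySem.Chars.upper name.toList).headD '?'
        :: pvPadTake 3 (pvRun ((PySem.Chars.upper name.toList).headD '?')
              (pvDmap ((PySem.Chars.upper name.toList).drop 1))) := by
  unfold pvSoundexA
  simp only [h, if_false]
  rw [foldA_eq_run _ [(PySem.Chars.upper name.toList).headD '?'] (by simp)]
  have hg : ∀ x : Char, [x].getLastD '?' = x := by intro x; simp
  simp only [hg, List.cons_append, List.nil_append]
  rw [List.take_succ_cons]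
  congr 1
  have h0 : "0000".toList = List.replicate 4 '0' := by decide
  rw [h0, pvPadTake, take_app_rep 3 4 _ (by omega)]

-- ===== VERDICT (by name: the statement is the Claim_ definition above) =====
theorem check_phonetic_similarity_py_spec : Claim_equal_check_phonetic_similarity_py := by
  intro name1 name2 _
  unfold Spec_check_phonetic_similarity_py check_phonetic_similarity_py
    check_phonetic_similarity_py_alt
  by_cases h4 : name1.toList.length < 4 ∨ name2.toList.length < 4
  · rw [if_pos h4]
    rcases h4 with h | h
    · rw [decide_eq_false (by omega : ¬ 4 ≤ name1.toList.length)]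
      simp
    · rw [decide_eq_false (by omega : ¬ 4 ≤ name2.toList.length)]
      simp
  · rw [if_neg h4]
    obtain ⟨h1, h2⟩ : 4 ≤ name1.toList.length ∧ 4 ≤ name2.toList.length := by
      constructor <;> omega
    have hn1 : ¬ name1.toList = [] := by
      intro e; rw [e] at h1; simp at h1
    have hn2 : ¬ name2.toList = [] := by
      intro e; rw [e] at h2; simp at h2
    rw [decide_eq_true h1, decide_eq_true h2]
    simp only [Bool.and_true]
    have hbeq : ∀ (x y : List Char), (x == y) = decide (x = y) := by
      intro x y; by_cases h : x = y <;> simp [h]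
    rw [hbeq, soundexA_char name1 hn1, soundexA_char name2 hn2, cmp_spec]
    by_cases hh : (PySem.Chars.upper name1.toList).headD '?'
        = (PySem.Chars.upper name2.toList).headD '?'
    · rw [if_neg (not_not_intro hh)]
      refine Eq.trans (decide_eq_decide.mpr ?_) (by rw [hh])
      constructor
      · intro e
        injection e with _ e2
        rw [hh] at e2
        exact e2
      · intro e
        rw [hh]
        exact congrArg _ e
    · rw [if_pos hh]
      refine decide_eq_false ?_
      intro e; injection e with e1 _; exact hh e1
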